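-- pv_equiv track=rewrite | github.com/BarnettZhou/LocalPortal | src/lportal/beauty.py | _process_content_chunk
-- ===== SOURCE A (Python) =====
-- def _process_content_chunk(chunk: str, in_think: bool) -> tuple[list[tuple[str, str]], bool]:
--     """
--     处理 content 中的 <think> 标签
--     返回: [(text, style), ...], new_in_think
--     style: 'white' 或 'dim gray'
--     """
--     result: list[tuple[str, str]] = []
--     remaining = chunk
--
--     while remaining:
--         if not in_think:
--             if "<think>" in remaining:
--                 before, _, after = remaining.partition("<think>")
--                 if before:
--                     result.append((before, "white"))
--                 in_think = True
--                 remaining = after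
--             else:
--                 result.append((remaining, "white"))
--                 remaining = ""
--         else:
--             if "</think>" in remaining:
--                 think_part, _, after = remaining.partition("</think>")
--                 if think_part:
--                     result.append((think_part, "dim gray"))
--                 in_think = False
--                 remaining = after
--             else:
--                 result.append((remaining, "dim gray"))
--                 remaining = ""
--
--     return result, in_think
-- ===== SOURCE B (Python) =====
-- def _scan_tags(chunk: str) -> list[tuple[int, bool]]:
--     """One left-to-right pass: every occurrence of <think>/</think> as (pos, is_closing)."""
--     tags = []
--     i = 0
--     n = len(chunk)
--     while i < n:
--         if chunk.startswith("</think>", i):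
--             tags.append((i, True))
--             i += 8
--         elif chunk.startswith("<think>", i):
--             tags.append((i, False))
--             i += 7
--         else:
--             i += 1
--     return tags
--
--
-- def _process_content_chunk(chunk: str, in_think: bool) -> tuple[list[tuple[str, str]], bool]:
--     result: list[tuple[str, str]] = []
--     start = 0
--     for pos, closing in _scan_tags(chunk):
--         if closing == in_think:  # only the tag the current state is seeking splits
--             seg = chunk[start:pos]
--             if seg:
--                 result.append((seg, "dim gray" if in_think else "white"))
--             start = pos + (8 if closing else 7)
--             in_think = not in_think
--     tail = chunk[start:]
--     if tail:
--         result.append((tail, "dim gray" if in_think else "white"))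
--     return result, in_think
-- ===== Notes on version B (the rewrite author's own statement) =====
-- stated objective: alternative
-- what changed: B replaces A's repeated whole-string substring searches (`in` + `partition` inside a while loop) by one left-to-right scan that enumerates every tag occurrence once, then a single fold over that tag list with a start cursor that skips tags of the wrong direction.
import Mathlib
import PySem

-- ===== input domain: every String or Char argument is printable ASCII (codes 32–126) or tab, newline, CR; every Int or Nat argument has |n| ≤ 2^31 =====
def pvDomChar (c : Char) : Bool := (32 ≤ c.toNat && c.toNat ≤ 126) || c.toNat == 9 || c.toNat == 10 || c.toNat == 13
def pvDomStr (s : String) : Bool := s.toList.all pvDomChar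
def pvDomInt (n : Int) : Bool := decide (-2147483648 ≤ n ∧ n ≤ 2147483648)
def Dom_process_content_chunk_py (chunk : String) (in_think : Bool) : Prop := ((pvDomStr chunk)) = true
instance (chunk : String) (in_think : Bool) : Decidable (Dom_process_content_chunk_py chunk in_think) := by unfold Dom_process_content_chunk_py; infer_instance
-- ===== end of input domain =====

-- B replaces A's while-loop of whole-remainder substring searches + partition by a single
-- left-to-right scan enumerating all tag occurrences once, then one fold over that list with a
-- start cursor (objective: alternative; same return value, proved equivalent on all inputs).

-- ===== PORT A =====
def pvOpenTag : List Char := ['<', 't', 'h', 'i', 'n', 'k', '>']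
def pvCloseTag : List Char := ['<', '/', 't', 'h', 'i', 'n', 'k', '>']

-- A's `remaining.partition(tag)` is ported exactly as find/take/drop at the first occurrence
-- (that is CPython's partition); `tag in remaining` is PySem.Chars.isIn.
def pvLoopA (rem : List Char) (it : Bool) : List (String × String) × Bool :=
  if hrem : rem = [] then ([], it)
  else
    if it = false then
      if PySem.Chars.isIn pvOpenTag rem then
        let i := (PySem.Chars.find rem pvOpenTag).toNat
        let before := rem.take i
        let rest := pvLoopA (rem.drop (i + 7)) true
        ((if before = [] then [] else [(String.ofList before, "white")]) ++ rest.1, rest.2)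
      else ([(String.ofList rem, "white")], it)
    else
      if PySem.Chars.isIn pvCloseTag rem then
        let i := (PySem.Chars.find rem pvCloseTag).toNat
        let before := rem.take i
        let rest := pvLoopA (rem.drop (i + 8)) false
        ((if before = [] then [] else [(String.ofList before, "dim gray")]) ++ rest.1, rest.2)
      else ([(String.ofList rem, "dim gray")], it)
termination_by rem.length
decreasing_by
  · simp only [List.length_drop]
    have : 0 < rem.length := List.length_pos_iff.mpr hrem
    omega
  · simp only [List.length_drop]
    have : 0 < rem.length := List.length_pos_iff.mpr hrem
    omega

def process_content_chunk_py (chunk : String) (in_think : Bool) : (List (String × String)) × Bool :=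
  pvLoopA chunk.toList in_think

-- ===== PORT B =====
def pvStyle (it : Bool) : String := if it then "dim gray" else "white"

def pvTagLen (closing : Bool) : Nat := if closing then 8 else 7

-- Source B's _scan_tags: `chunk.startswith(tag, i)` is `tag <+: (suffix at i)`.
def pvScanTags (s : List Char) (i : Nat) : List (Nat × Bool) :=
  if hs : s = [] then []
  else if pvCloseTag <+: s then (i, true) :: pvScanTags (s.drop 8) (i + 8)
  else if pvOpenTag <+: s then (i, false) :: pvScanTags (s.drop 7) (i + 7)
  else pvScanTags s.tail (i + 1)
termination_by s.length
decreasing_by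
  all_goals
    first
    | (simp only [List.length_drop]
       have : 0 < s.length := List.length_pos_iff.mpr hs
       omega)
    | (simp only [List.length_tail]
       have : 0 < s.length := List.length_pos_iff.mpr hs
       omega)

-- Source B's for-loop over the tag list with accumulator `result`, cursor `start`, flag `in_think`;
-- chunk[start:pos] / chunk[start:] are PySem.List.slice.
def pvLoopB (chunk : List Char) (tags : List (Nat × Bool)) (acc : List (String × String))
    (start : Nat) (it : Bool) : List (String × String) × Bool :=
  match tags with
  | [] =>
    let tail := PySem.List.slice chunk (some (start : Int)) none
    (if tail = [] then acc else acc ++ [(String.ofList tail, pvStyle it)], it)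
  | (pos, closing) :: rest =>
    if closing = it then
      let seg := PySem.List.slice chunk (some (start : Int)) (some (pos : Int))
      pvLoopB chunk rest (if seg = [] then acc else acc ++ [(String.ofList seg, pvStyle it)])
        (pos + pvTagLen closing) (!it)
    else pvLoopB chunk rest acc start it

def process_content_chunk_py_alt (chunk : String) (in_think : Bool) : (List (String × String)) × Bool :=
  pvLoopB chunk.toList (pvScanTags chunk.toList 0) [] 0 in_think

-- ===== PRECONDITION & SPEC =====
def Spec_process_content_chunk_py (chunk : String) (in_think : Bool) (out : (List (String × String)) × Bool) : Prop := out = process_content_chunk_py_alt chunk in_think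
instance (chunk : String) (in_think : Bool) (out : (List (String × String)) × Bool) : Decidable (Spec_process_content_chunk_py chunk in_think out) := by unfold Spec_process_content_chunk_py; infer_instance

-- ===== CLAIM (what is proved, stated in full; the proofs are below) =====
def Claim_equal_process_content_chunk_py : Prop := ∀ (chunk : String) (in_think : Bool), Dom_process_content_chunk_py chunk in_think → Spec_process_content_chunk_py chunk in_think (process_content_chunk_py chunk in_think)

-- ===== LEMMAS AND PROOFS =====

-- the tag A searches for in state `it` (A seeks </think> inside think, <think> outside)
def pvTag (it : Bool) : List Char := if it then pvCloseTag else pvOpenTag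

theorem pvTag_len (it : Bool) : (pvTag it).length = pvTagLen it := by
  cases it <;> decide

-- tag occurrences never overlap: no tag starts strictly inside, or at the start of, an
-- occurrence of the OTHER tag ('<' only occurs at offset 0 of either tag)
theorem pv_no_cross (b it : Bool) (hne : b ≠ it) (s : List Char) (hb : pvTag b <+: s) :
    ∀ d < pvTagLen b, ¬ pvTag it <+: s.drop d := by
  intro d hd hcontra
  obtain ⟨r, rfl⟩ := hb
  rw [List.drop_append_of_le_length (by rw [pvTag_len]; omega)] at hcontra
  cases b <;> cases it <;> simp at hne <;> simp [pvTagLen] at hd <;>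
    interval_cases d <;>
    simp [pvTag, pvOpenTag, pvCloseTag, List.cons_prefix_cons] at hcontra

theorem pv_find_eq (s t : List Char) (k : Nat) (hk : t <+: s.drop k)
    (hmin : ∀ j < k, ¬ t <+: s.drop j) : PySem.Chars.find s t = (k : Int) := by
  have hinf : t <:+: s := List.infix_iff_prefix_suffix.mpr ⟨s.drop k, hk, List.drop_suffix k s⟩
  have hnn : 0 ≤ PySem.Chars.find s t := (PySem.Chars.find_nonneg_iff s t).mpr hinf
  obtain ⟨hpre, hspec⟩ := PySem.Chars.find_spec hnn
  have hne1 : (PySem.Chars.find s t).toNat = k := by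
    rcases Nat.lt_trichotomy (PySem.Chars.find s t).toNat k with h | h | h
    · exact absurd hpre (hmin _ h)
    · exact h
    · exact absurd hk (hspec k h)
  omega

-- if the scanner finds nothing, no tag occurs anywhere
theorem pv_scan_nil (s : List Char) (c : Nat) (h : pvScanTags s c = []) :
    ∀ j b, ¬ pvTag b <+: s.drop j := by
  fun_induction pvScanTags s c with
  | case1 =>
    intro j b hp
    rw [List.drop_nil, List.prefix_nil] at hp
    cases b <;> simp [pvTag, pvOpenTag, pvCloseTag] at hp
  | case2 s c hne h1 ih => simp at h
  | case3 s c hne h1 h2 ih => simp at h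
  | case4 s c hne h1 h2 ih =>
    intro j b hp
    match j with
    | 0 =>
      simp only [List.drop_zero] at hp
      cases b <;> simp [pvTag] at hp <;> [exact h2 hp; exact h1 hp]
    | j + 1 =>
      have hdt : s.tail.drop j = s.drop (j + 1) := by
        rw [← List.drop_one, List.drop_drop, Nat.add_comm]
      exact ih h j b (by rw [hdt]; exact hp)

-- the scanner's head names the FIRST tag occurrence; its tail rescans past it
theorem pv_scan_cons (s : List Char) (c : Nat) (pos : Nat) (closing : Bool)
    (rest : List (Nat × Bool)) (h : pvScanTags s c = (pos, closing) :: rest) :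
    c ≤ pos ∧ pvTag closing <+: s.drop (pos - c) ∧
      (∀ j b, j < pos - c → ¬ pvTag b <+: s.drop j) ∧
      rest = pvScanTags (s.drop (pos - c + pvTagLen closing)) (pos + pvTagLen closing) := by
  fun_induction pvScanTags s c with
  | case1 => simp at h
  | case2 s c hne h1 =>
    rw [List.cons.injEq, Prod.mk.injEq] at h
    obtain ⟨⟨rfl, rfl⟩, rfl⟩ := h
    refine ⟨le_refl _, by simpa [pvTag] using h1, ?_, by simp [pvTagLen]⟩
    intro j b hj
    exact absurd hj (by omega)
  | case3 s c hne h1 h2 =>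
    rw [List.cons.injEq, Prod.mk.injEq] at h
    obtain ⟨⟨rfl, rfl⟩, rfl⟩ := h
    refine ⟨le_refl _, by simpa [pvTag] using h2, ?_, by simp [pvTagLen]⟩
    intro j b hj
    exact absurd hj (by omega)
  | case4 s c hne h1 h2 ih =>
    obtain ⟨hc, hpre, hmin, hrest⟩ := ih h
    have hdt : ∀ k : Nat, s.tail.drop k = s.drop (k + 1) := by
      intro k; rw [← List.drop_one, List.drop_drop, Nat.add_comm]
    refine ⟨by omega, ?_, ?_, ?_⟩
    · have he : pos - c = (pos - (c + 1)) + 1 := by omega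
      rw [he, ← hdt]; exact hpre
    · intro j b hj
      match j with
      | 0 =>
        simp only [List.drop_zero]
        cases b <;> simp [pvTag] <;> [exact h2; exact h1]
      | j + 1 =>
        rw [← hdt]
        exact hmin j b (by omega)
    · have he : pos - c + pvTagLen closing = (pos - (c + 1) + pvTagLen closing) + 1 := by omega
      rw [he, ← hdt]; exact hrest

-- main invariant lemma: B's fold over the remaining scanned tags computes A's loop on the
-- remaining suffix, provided the sought tag has no occurrence between start and cursor
theorem pv_main (chunk : List Char) (tags : List (Nat × Bool)) :
    ∀ cursor start acc it,
      tags = pvScanTags (chunk.drop cursor) cursor →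
      start ≤ cursor →
      (∀ j, start ≤ j → j < cursor → ¬ pvTag it <+: chunk.drop j) →
      pvLoopB chunk tags acc start it =
        (acc ++ (pvLoopA (chunk.drop start) it).1, (pvLoopA (chunk.drop start) it).2) := by
  induction tags with
  | nil =>
    intro cursor start acc it hscan hsc hinv
    have hnone : ∀ j, start ≤ j → ¬ pvTag it <+: chunk.drop j := by
      intro j hj hp
      rcases Nat.lt_or_ge j cursor with h | h
      · exact hinv j hj h hp
      · refine pv_scan_nil _ _ hscan.symm (j - cursor) it ?_
        rw [List.drop_drop]
        have : cursor + (j - cursor) = j := by omega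
        rw [this]; exact hp
    have hisIn : PySem.Chars.isIn (pvTag it) (chunk.drop start) = false := by
      by_cases h : PySem.Chars.isIn (pvTag it) (chunk.drop start) = true
      · obtain ⟨j, hj⟩ := (PySem.Chars.exists_prefix_drop_iff_isIn _ _).mpr h
        rw [List.drop_drop] at hj
        exact absurd hj (hnone (start + j) (by omega))
      · simpa using h
    rw [pvLoopB, pvLoopA]
    simp only [PySem.List.slice_from_natCast]
    by_cases hnil : chunk.drop start = []
    · simp [hnil]
    · cases it <;>
        simp [pvTag] at hisIn <;>
        simp [hnil, hisIn, pvStyle]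
  | cons head rest ih =>
    obtain ⟨pos, closing⟩ := head
    intro cursor start acc it hscan hsc hinv
    obtain ⟨hcpos, hpre, hmin, hrest⟩ := pv_scan_cons _ _ _ _ _ hscan.symm
    rw [List.drop_drop] at hpre
    have hposc : cursor + (pos - cursor) = pos := by omega
    rw [hposc] at hpre
    have hsought : ∀ j, start ≤ j → j < pos → ¬ pvTag it <+: chunk.drop j := by
      intro j hj1 hj2 hp
      rcases Nat.lt_or_ge j cursor with h | h
      · exact hinv j hj1 h hp
      · refine hmin (j - cursor) it (by omega) ?_
        rw [List.drop_drop]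
        have : cursor + (j - cursor) = j := by omega
        rw [this]; exact hp
    by_cases hci : closing = it
    · -- the scanned tag is the one A is seeking: both split here
      subst hci
      have hsp : start ≤ pos := le_trans hsc hcpos
      have hk : pvTag closing <+: (chunk.drop start).drop (pos - start) := by
        rw [List.drop_drop]
        have : start + (pos - start) = pos := by omega
        rw [this]; exact hpre
      have hfind : PySem.Chars.find (chunk.drop start) (pvTag closing) = ((pos - start : Nat) : Int) := by
        refine pv_find_eq _ _ _ hk ?_
        intro j hj hp
        rw [List.drop_drop] at hp
        exact hsought (start + j) (by omega) (by omega) hp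
      have hTlen : 0 < (pvTag closing).length := by cases closing <;> decide
      have hne : chunk.drop start ≠ [] := by
        intro hnil
        have h1 := hk.length_le
        simp only [List.drop_drop, List.length_drop] at h1
        have h2 : chunk.length ≤ start := by
          have := congrArg List.length hnil
          simp [List.length_drop] at this
          omega
        omega
      have hrest' : rest = pvScanTags (chunk.drop (pos + pvTagLen closing)) (pos + pvTagLen closing) := by
        rw [hrest, List.drop_drop]
        have : cursor + (pos - cursor + pvTagLen closing) = pos + pvTagLen closing := by omega
        rw [this]
      have hA : pvLoopA (chunk.drop start) closing =
          ((if (chunk.drop start).take (pos - start) = [] then []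
            else [(String.ofList ((chunk.drop start).take (pos - start)), pvStyle closing)]) ++
            (pvLoopA (chunk.drop (pos + pvTagLen closing)) (!closing)).1,
           (pvLoopA (chunk.drop (pos + pvTagLen closing)) (!closing)).2) := by
        have hdrop : ∀ L : Nat, (chunk.drop start).drop (pos - start + L) = chunk.drop (pos + L) := by
          intro L
          rw [List.drop_drop]
          have : start + (pos - start + L) = pos + L := by omega
          rw [this]
        have hisIn : PySem.Chars.isIn (pvTag closing) (chunk.drop start) = true := by
          refine (PySem.Chars.exists_prefix_drop_iff_isIn _ _).mp ⟨pos - start, hk⟩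
        cases closing
        · simp [pvTag] at hisIn hfind
          have h7 : start + (pos - start + 7) = pos + 7 := by omega
          rw [pvLoopA]
          simp [hne, hisIn, hfind, pvStyle, pvTagLen, h7]
        · simp [pvTag] at hisIn hfind
          have h8 : start + (pos - start + 8) = pos + 8 := by omega
          rw [pvLoopA]
          simp [hne, hisIn, hfind, pvStyle, pvTagLen, h8]
      rw [pvLoopB]
      simp only [if_pos rfl] <;> rw [ih (pos + pvTagLen closing) (pos + pvTagLen closing) _ (!closing) hrest' (le_refl _)
        (by intro j h1 h2; omega)]
      rw [hA]
      have hseg : PySem.List.slice chunk (some (start : Int)) (some (pos : Int)) =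
          (chunk.drop start).take (pos - start) := PySem.List.slice_natCast chunk start pos
      rw [hseg]
      by_cases hempty : (chunk.drop start).take (pos - start) = [] <;>
        simp [hempty, List.append_assoc]
    · -- a stray opposite-direction tag: B skips it, A never splits inside it
      have hgap2 : ∀ j, pos ≤ j → j < pos + pvTagLen closing → ¬ pvTag it <+: chunk.drop j := by
        intro j h1 h2 hp
        refine pv_no_cross closing it hci (chunk.drop pos) hpre (j - pos) (by omega) ?_
        rw [List.drop_drop]
        have : pos + (j - pos) = j := by omega
        rw [this]; exact hp
      have hrest' : rest = pvScanTags (chunk.drop (pos + pvTagLen closing)) (pos + pvTagLen closing) := by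
        rw [hrest, List.drop_drop]
        have : cursor + (pos - cursor + pvTagLen closing) = pos + pvTagLen closing := by omega
        rw [this]
      rw [pvLoopB]
      simp only [if_neg hci]
      exact ih (pos + pvTagLen closing) start acc it hrest' (by omega)
        (by
          intro j h1 h2
          rcases Nat.lt_or_ge j pos with h | h
          · exact hsought j h1 h
          · exact hgap2 j h h2)

-- ===== VERDICT (by name: the statement is the Claim_ definition above) =====
theorem process_content_chunk_py_spec : Claim_equal_process_content_chunk_py := by
  intro chunk in_think _
  unfold Spec_process_content_chunk_py process_content_chunk_py process_content_chunk_py_alt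
  have h := pv_main chunk.toList (pvScanTags chunk.toList 0) 0 0 [] in_think
    (by rw [List.drop_zero]) (le_refl _) (by intro j h1 h2; omega)
  rw [List.drop_zero] at h
  rw [h, List.nil_append]
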